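-- pv_equiv track=rewrite | github.com/roytian1992/NarrativeKnowledgeWeaver | scripts/compare_event_first_pipeline.py | _dedup_grounded_entities
-- ===== SOURCE A (Python) =====
-- from typing import Any, Dict, List, Tuple
--
-- def _dedup_grounded_entities(items: List[Dict[str, Any]]) -> List[Dict[str, Any]]:
--     merged: Dict[str, Dict[str, Any]] = {}
--     for item in items or []:
--         if not isinstance(item, dict):
--             continue
--         name = str(item.get("name", "")).strip()
--         etype = str(item.get("type", "")).strip()
--         if not name or not etype:
--             continue
--         key = (name.lower(), etype)
--         cur = merged.get(key)
--         if cur is None or len(str(item.get("description", ""))) > len(str(cur.get("description", ""))):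
--             merged[key] = item
--     return list(merged.values())
-- ===== SOURCE B (Python) =====
-- from collections import defaultdict
-- from typing import Any, Dict, List
--
-- def _dedup_grounded_entities(items: List[Dict[str, Any]]) -> List[Dict[str, Any]]:
--     groups: "defaultdict[tuple, list]" = defaultdict(list)
--     for item in items or []:
--         if not isinstance(item, dict):
--             continue
--         name = str(item.get("name", "")).strip()
--         etype = str(item.get("type", "")).strip()
--         if not name or not etype:
--             continue
--         groups[(name.lower(), etype)].append(item)
--     return [max(group, key=lambda it: len(str(it.get("description", ""))))
--             for group in groups.values()]
-- ===== Notes on version B (the rewrite author's own statement) =====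
-- stated objective: alternative
-- what changed: Replaces A's inline running-best-per-key dict update with a two-pass group-then-reduce: first bucket surviving items into per-key lists in first-appearance order, then pick the first maximal-description item of each bucket with max().
import Mathlib
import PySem

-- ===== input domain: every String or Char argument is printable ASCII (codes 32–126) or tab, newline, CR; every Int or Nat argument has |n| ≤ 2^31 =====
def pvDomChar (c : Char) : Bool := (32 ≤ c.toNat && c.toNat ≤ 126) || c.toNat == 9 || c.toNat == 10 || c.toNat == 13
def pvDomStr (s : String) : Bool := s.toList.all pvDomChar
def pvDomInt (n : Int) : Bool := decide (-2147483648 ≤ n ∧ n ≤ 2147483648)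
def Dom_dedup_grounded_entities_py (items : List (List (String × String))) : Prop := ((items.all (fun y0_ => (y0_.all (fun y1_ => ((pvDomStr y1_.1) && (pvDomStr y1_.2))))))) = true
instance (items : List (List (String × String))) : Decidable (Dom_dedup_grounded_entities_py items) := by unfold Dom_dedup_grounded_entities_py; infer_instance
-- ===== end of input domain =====

-- B replaces A's inline running-best update with an explicit group-then-reduce (bucket by key, then first-max per bucket); objective: alternative decomposition, same cost.

-- shared tiny helpers: item.get(k, "") and len(str(item.get("description","")))
def pvGet (item : List (String × String)) (k : String) : String :=
  (PySem.Dict.mk item).getD k ""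

def pvDescLen (item : List (String × String)) : Int :=
  PySem.Str.len (pvGet item "description")

-- ===== PORT A =====
-- fold body of A's loop: running best per key, strictly-greater replaces
def pvStepA (merged : PySem.Dict (String × String) (List (String × String)))
    (item : List (String × String)) : PySem.Dict (String × String) (List (String × String)) :=
  let name := PySem.Str.strip (pvGet item "name")
  let etype := PySem.Str.strip (pvGet item "type")
  if name = "" || etype = "" then merged
  else
    let key := (PySem.Str.lower name, etype)
    match merged.get? key with
    | none => merged.insert key item
    | some cur => if pvDescLen item > pvDescLen cur then merged.insert key item else merged

def dedup_grounded_entities_py (items : List (List (String × String))) : List (List (String × String)) :=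
  (items.foldl pvStepA PySem.Dict.empty).values

-- ===== PORT B =====
-- max(group, key=len of description): Python max returns the FIRST element of maximal key
def pvBest (group : List (List (String × String))) : List (String × String) :=
  match group with
  | [] => []
  | x :: xs => xs.foldl (fun best it => if pvDescLen it > pvDescLen best then it else best) x

-- fold body of B's grouping loop: groups[key].append(item)
def pvStepB (groups : PySem.Dict (String × String) (List (List (String × String))))
    (item : List (String × String)) : PySem.Dict (String × String) (List (List (String × String))) :=
  let name := PySem.Str.strip (pvGet item "name")
  let etype := PySem.Str.strip (pvGet item "type")
  if name = "" || etype = "" then groups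
  else groups.modify (PySem.Str.lower name, etype) [] (· ++ [item])

def dedup_grounded_entities_py_alt (items : List (List (String × String))) : List (List (String × String)) :=
  ((items.foldl pvStepB PySem.Dict.empty).values).map pvBest

-- ===== PRECONDITION & SPEC =====
def Spec_dedup_grounded_entities_py (items : List (List (String × String))) (out : List (List (String × String))) : Prop := out = dedup_grounded_entities_py_alt items
instance (items : List (List (String × String))) (out : List (List (String × String))) : Decidable (Spec_dedup_grounded_entities_py items out) := by unfold Spec_dedup_grounded_entities_py; infer_instance

-- ===== CLAIM (what is proved, stated in full; the proofs are below) =====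
def Claim_equal_dedup_grounded_entities_py : Prop := ∀ (items : List (List (String × String))), Dom_dedup_grounded_entities_py items → Spec_dedup_grounded_entities_py items (dedup_grounded_entities_py items)

-- ===== LEMMAS AND PROOFS =====

-- the relation the two fold states keep: A's dict is B's dict with each bucket reduced by pvBest
def pvRel (g : PySem.Dict (String × String) (List (List (String × String))))
    (m : PySem.Dict (String × String) (List (String × String))) : Prop :=
  m.items = g.items.map (fun p => (p.1, pvBest p.2)) ∧
  (∀ p ∈ g.items, p.2 ≠ []) ∧ g.keys.Nodup

-- get? through a per-value map of the items list
lemma pvGet?_mk_map (l : List ((String × String) × List (List (String × String))))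
    (k : String × String) :
    (PySem.Dict.mk (l.map (fun p => (p.1, pvBest p.2)))).get? k
      = ((PySem.Dict.mk l).get? k).map pvBest := by
  induction l with
  | nil => rfl
  | cons p l ih =>
    obtain ⟨pk, pv⟩ := p
    simp only [List.map_cons, PySem.Dict.get?_mk_cons]
    by_cases hpk : pk == k
    · simp [hpk]
    · simp [hpk, ih]

-- Python max over a one-longer list: strictly greater replaces the running first-max
lemma pvBest_append (x y : List (String × String)) (xs : List (List (String × String))) :
    pvBest ((x :: xs) ++ [y])
      = if pvDescLen y > pvDescLen (pvBest (x :: xs)) then y else pvBest (x :: xs) := by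
  simp [pvBest, List.foldl_append]

lemma pvStep_rel (g : PySem.Dict (String × String) (List (List (String × String))))
    (m : PySem.Dict (String × String) (List (String × String)))
    (item : List (String × String)) (h : pvRel g m) :
    pvRel (pvStepB g item) (pvStepA m item) := by
  obtain ⟨hi, hne, hnd⟩ := h
  unfold pvStepA pvStepB
  by_cases hc : PySem.Str.strip (pvGet item "name") = "" || PySem.Str.strip (pvGet item "type") = ""
  · simp only [if_pos hc]; exact ⟨hi, hne, hnd⟩
  · simp only [if_neg hc]
    set k := (PySem.Str.lower (PySem.Str.strip (pvGet item "name")), PySem.Str.strip (pvGet item "type")) with hkdef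
    have hm : m = PySem.Dict.mk (g.items.map (fun p => (p.1, pvBest p.2))) := by
      apply PySem.Dict.ext; exact hi
    have hget : m.get? k = (g.get? k).map pvBest := by
      rw [hm, pvGet?_mk_map]
    have hmod : g.modify k [] (· ++ [item]) = g.insert k (g.getD k [] ++ [item]) := rfl
    cases hg : g.get? k with
    | none =>
      have hmk : m.get? k = none := by rw [hget, hg]; rfl
      have hgc : g.contains k = false := (PySem.Dict.get?_eq_none_iff_contains g k).mp hg
      have hmc : m.contains k = false := (PySem.Dict.get?_eq_none_iff_contains m k).mp hmk
      have hgd : g.getD k [] = [] := PySem.Dict.getD_of_get?_eq_none g [] hg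
      simp only [hmk, hmod, hgd, List.nil_append]
      refine ⟨?_, ?_, ?_⟩
      · rw [PySem.Dict.items_insert_of_not_contains m item hmc,
            PySem.Dict.items_insert_of_not_contains g [item] hgc]
        simp [hi, pvBest]
      · intro p hp
        rw [PySem.Dict.items_insert_of_not_contains g [item] hgc] at hp
        rcases List.mem_append.mp hp with h1 | h1
        · exact hne p h1
        · simp_all
      · rw [PySem.Dict.keys_insert_of_not_contains g [item] hgc]
        refine List.Nodup.append hnd (List.nodup_singleton k) ?_
        intro a ha hb
        simp at hb; subst hb
        exact absurd ((PySem.Dict.contains_iff_mem_keys g k).mpr ha) (by simp [hgc])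
    | some grp =>
      have hmk : m.get? k = some (pvBest grp) := by rw [hget, hg]; rfl
      have hgc : g.contains k = true := by
        rw [PySem.Dict.contains_eq_isSome_get?, hg]; rfl
      have hmc : m.contains k = true := by
        rw [PySem.Dict.contains_eq_isSome_get?, hmk]; rfl
      have hmem : (k, grp) ∈ g.items := PySem.Dict.mem_items_of_get?_eq_some g hg
      have hgrp_ne : grp ≠ [] := hne _ hmem
      have hgd : g.getD k [] = grp := PySem.Dict.getD_of_get?_eq_some g [] hg
      have huniq : ∀ p ∈ g.items, p.1 = k → p.2 = grp := by
        intro p hp hpk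
        have := PySem.Dict.get?_of_mem_items (d := g) (k := p.1) (v := p.2)
          (by simpa using hp) hnd
        rw [hpk, hg] at this
        exact (Option.some.injEq _ _).mp this.symm
      obtain ⟨x, xs, rfl⟩ : ∃ x xs, grp = x :: xs := by
        cases grp with
        | nil => exact absurd rfl hgrp_ne
        | cons a b => exact ⟨a, b, rfl⟩
      simp only [hmk, hmod, hgd]
      have hkeysB : (g.insert k ((x :: xs) ++ [item])).keys = g.keys :=
        PySem.Dict.keys_insert_of_contains g _ hgc
      have hneB : ∀ p ∈ (g.insert k ((x :: xs) ++ [item])).items, p.2 ≠ [] := by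
        intro p hp
        rw [PySem.Dict.items_insert_of_contains g _ hgc] at hp
        rcases List.mem_map.mp hp with ⟨q, hq, rfl⟩
        by_cases hqk : q.1 == k
        · simp [hqk]
        · simpa [hqk] using hne q hq
      by_cases hlen : pvDescLen item > pvDescLen (pvBest (x :: xs))
      · simp only [if_pos hlen]
        refine ⟨?_, hneB, by rw [hkeysB]; exact hnd⟩
        rw [PySem.Dict.items_insert_of_contains m item hmc,
            PySem.Dict.items_insert_of_contains g _ hgc, hi,
            List.map_map, List.map_map]
        apply List.map_congr_left
        intro p hp
        by_cases hpk : p.1 == k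
        · have hpk' : p.1 = k := by simpa using hpk
          have hp2 : p.2 = x :: xs := huniq p hp hpk'
          simp only [Function.comp_apply, hpk', beq_self_eq_true, if_true]
          rw [pvBest_append, if_pos hlen]
        · simp [Function.comp, hpk]
      · simp only [if_neg hlen]
        refine ⟨?_, hneB, by rw [hkeysB]; exact hnd⟩
        rw [PySem.Dict.items_insert_of_contains g _ hgc, hi, List.map_map]
        symm
        apply List.map_congr_left
        intro p hp
        by_cases hpk : p.1 == k
        · have hpk' : p.1 = k := by simpa using hpk
          have hp2 : p.2 = x :: xs := huniq p hp hpk'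
          simp only [Function.comp_apply, hpk', beq_self_eq_true, if_true]
          rw [pvBest_append, if_neg hlen, hp2]
        · simp [Function.comp, hpk]

lemma pvFold_rel (items : List (List (String × String)))
    (g : PySem.Dict (String × String) (List (List (String × String))))
    (m : PySem.Dict (String × String) (List (String × String)))
    (h : pvRel g m) : pvRel (items.foldl pvStepB g) (items.foldl pvStepA m) := by
  induction items generalizing g m with
  | nil => exact h
  | cons it rest ih => exact ih _ _ (pvStep_rel g m it h)

-- ===== VERDICT (by name: the statement is the Claim_ definition above) =====
theorem dedup_grounded_entities_py_spec : Claim_equal_dedup_grounded_entities_py := by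
  intro items _
  unfold Spec_dedup_grounded_entities_py dedup_grounded_entities_py dedup_grounded_entities_py_alt
  have h := pvFold_rel items PySem.Dict.empty PySem.Dict.empty (by simp [pvRel, PySem.Dict.empty])
  obtain ⟨hitems, -, -⟩ := h
  simp [PySem.Dict.values, hitems, Function.comp]
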